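-- pv_equiv track=rewrite | github.com/blackgar/algorithm | 파이썬 알고리즘 연습/섹션2. 단순구현/9. 주사위 게임/solution2.py | check_reward
-- ===== SOURCE A (Python) =====
-- def count_number(arr):
--     # 주사위 눈 인덱스와 맞추기 위해 길이 7의 배열 선언
--     count_list = [0]*7
--     # 주사위 눈에 맞게 해당 배열에 + 1
--     for i in arr:
--         count_list[i] += 1
--     # 최종 배열 반환
--     return count_list
--
-- def check_reward(arr):
--     # 주사위 눈을 세어준 배열 반환 받기
--     count_list = count_number(arr)
--     # 그 중 제일 많이 나온 눈의 개수
--     max_count = max(count_list)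
--     # 만약 3개면 모두 같은 주사위 눈이 나왔다는 것이므로 1등 상금 지급
--     # count_list의 max값이 있는 곳의 인덱스가 곧 그 주사위 눈이 되는 원리 이용
--     if max_count == 3:
--         return count_list.index(max(count_list)) * 1000 + 10000
--     elif max_count == 2:
--         return count_list.index(max(count_list)) * 100 + 1000
--     # 모두 다른 눈이 나왔을 때는 내장 함수 max값이 제일 처음 찾아진 수의 인덱스를 가져오므로 직접 for문을 통해
--     # 뒤에서 부터 찾아 나온 주사위 눈 중 가장 큰 수로 상금을 계산할 수 있도록 구현
--     else:
--         for i in range(6, 0, -1):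
--             if count_list[i] == 1:
--                 return i * 100
-- ===== SOURCE B (Python) =====
-- # payout tables: prize per face
-- TRIPLE = {0: 10000, 1: 11000, 2: 12000, 3: 13000, 4: 14000, 5: 15000, 6: 16000}
-- PAIR = {0: 1000, 1: 1100, 2: 1200, 3: 1300, 4: 1400, 5: 1500, 6: 1600}
-- SINGLE = {0: 0, 1: 100, 2: 200, 3: 300, 4: 400, 5: 500, 6: 600}
--
-- def check_reward(arr):
--     # sort the rolls and group equal neighbours into (face, run-length) pairs,
--     # then pay out by the longest run: a run of 3 wins the triple prize for its
--     # face, a run of 2 the pair prize, otherwise the largest positive face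
--     # rolled exactly once wins its single prize
--     runs = []
--     for f in sorted(arr):
--         if runs and runs[-1][0] == f:
--             runs[-1] = (f, runs[-1][1] + 1)
--         else:
--             runs.append((f, 1))
--     m = max((c for _, c in runs), default=0)
--     if m == 3:
--         return TRIPLE[next(f for f, c in runs if c == 3)]
--     if m == 2:
--         return PAIR[next(f for f, c in runs if c == 2)]
--     return SINGLE[next(f for f, c in reversed(runs) if c == 1 and f > 0)]
-- ===== Notes on version B (the rewrite author's own statement) =====
-- stated objective: alternative
-- what changed: B sorts the rolls and groups equal neighbours into (face, run-length) pairs in one pass, then pays out of per-face prize tables keyed by the longest run (run of 3 -> triple prize, run of 2 -> pair prize on that face, else the largest positive face rolled exactly once), replacing A's fixed 7-slot count array with its max()/index() passes and reverse index scan; Pre_ keeps rolls to the faces 0..6 with a matching payout line, excluding negative rolls (where A's count array wraps around by negative indexing, an accident; …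
-- outside the precondition, e.g. on check_reward([-6, 1]): A returns 1100, B returns 100; on check_reward([-1, -1, 2]): A returns 1600, B raises KeyError; on check_reward([1, 1, 1, 1]): A returns None, B raises StopIteration
import Mathlib
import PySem

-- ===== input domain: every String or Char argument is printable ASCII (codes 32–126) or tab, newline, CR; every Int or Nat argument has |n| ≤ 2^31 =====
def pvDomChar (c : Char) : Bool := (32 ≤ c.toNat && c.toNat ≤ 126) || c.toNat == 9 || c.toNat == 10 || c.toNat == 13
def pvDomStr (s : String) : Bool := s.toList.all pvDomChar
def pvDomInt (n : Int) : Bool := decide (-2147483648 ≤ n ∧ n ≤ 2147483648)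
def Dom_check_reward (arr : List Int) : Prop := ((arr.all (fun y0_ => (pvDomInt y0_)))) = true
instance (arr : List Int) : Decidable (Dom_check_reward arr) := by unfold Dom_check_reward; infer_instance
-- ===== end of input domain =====

-- B sorts the rolls and groups equal neighbours into (face, run) pairs, then branches on
-- the longest run, replacing A's 7-slot count array with its max/index/reverse-scan passes.


-- ===== PORT A =====
-- count_list[i] += 1 : under Pre_ every i is 0..6, a valid index into the 7-slot list,
-- so the defaulting pyGetD/pySetD are exact there
def count_number (arr : List Int) : List Int :=
  arr.foldl
    (fun count_list i =>
      PySem.List.pySetD count_list i (PySem.List.pyGetD count_list i 0 + 1))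
    [0, 0, 0, 0, 0, 0, 0]

def check_reward (arr : List Int) : Int :=
  let count_list := count_number arr
  let max_count := (PySem.List.max? count_list (fun x => x)).getD 0
  if max_count == 3 then
    (((PySem.List.index? count_list ((PySem.List.max? count_list (fun x => x)).getD 0)).getD 0 : Nat) : Int) * 1000 + 10000
  else if max_count == 2 then
    (((PySem.List.index? count_list ((PySem.List.max? count_list (fun x => x)).getD 0)).getD 0 : Nat) : Int) * 100 + 1000
  else
    -- for i in range(6, 0, -1): if count_list[i] == 1: return i * 100
    match (PySem.List.pyRange 6 0 (-1)).find? (fun i => PySem.List.pyGetD count_list i 0 == 1) with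
    | some i => i * 100
    | none => 0  -- Python falls through returning None here (never under Pre_)

-- ===== PORT B =====
-- payout tables: prize per face; T[f] raises KeyError for a face outside 0..6, so the
-- defaulting lookup below is exact under Pre_, which keeps every selected face in 0..6
def pvTRIPLE : PySem.Dict Int Int :=
  PySem.Dict.ofList [(0, 10000), (1, 11000), (2, 12000), (3, 13000), (4, 14000), (5, 15000), (6, 16000)]
def pvPAIR : PySem.Dict Int Int :=
  PySem.Dict.ofList [(0, 1000), (1, 1100), (2, 1200), (3, 1300), (4, 1400), (5, 1500), (6, 1600)]
def pvSINGLE : PySem.Dict Int Int :=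
  PySem.Dict.ofList [(0, 0), (1, 100), (2, 200), (3, 300), (4, 400), (5, 500), (6, 600)]

-- loop body: extend the last run if the face repeats, else start a new run
def pvStep (runs : List (Int × Int)) (f : Int) : List (Int × Int) :=
  match runs.getLast? with
  | some p => if p.1 == f then runs.dropLast ++ [(f, p.2 + 1)] else runs ++ [(f, 1)]
  | none => [(f, 1)]

def check_reward_alt (arr : List Int) : Int :=
  let runs := (PySem.List.sorted arr (fun x => x) false).foldl pvStep []
  let m := (PySem.List.max? (runs.map (fun p => p.2)) (fun x => x)).getD 0
  if m == 3 then
    match runs.find? (fun p => p.2 == (3 : Int)) with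
    | some p => (pvTRIPLE.get? p.1).getD 0
    | none => 0  -- next() raises StopIteration here (never reached: m = 3 forces a run of 3)
  else if m == 2 then
    match runs.find? (fun p => p.2 == (2 : Int)) with
    | some p => (pvPAIR.get? p.1).getD 0
    | none => 0  -- as above
  else
    match runs.reverse.find? (fun p => p.2 == (1 : Int) && decide (0 < p.1)) with
    | some p => (pvSINGLE.get? p.1).getD 0
    | none => 0  -- next() raises StopIteration here (never under Pre_)

-- ===== PRECONDITION & SPEC =====
-- Pre_ is exactly where A returns an int on the game's face range: every roll a face 0..6
-- (negative rolls make A's count array wrap around by Python negative indexing, an accident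
-- of the implementation, and rolls ≥ 7 raise IndexError) and one payout line must match
-- (highest multiplicity exactly 2 or exactly 3, or some once-rolled positive face);
-- otherwise A falls through returning None and B's next() raises StopIteration.
def Pre_check_reward (arr : List Int) : Prop :=
  (∀ v ∈ arr, 0 ≤ v ∧ v ≤ 6) ∧
  (((∃ v ∈ arr, arr.count v = 2) ∧ (∀ v ∈ arr, arr.count v ≤ 2)) ∨
   ((∃ v ∈ arr, arr.count v = 3) ∧ (∀ v ∈ arr, arr.count v ≤ 3)) ∨
   (∃ v ∈ arr, v ≠ 0 ∧ arr.count v = 1))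
instance (arr : List Int) : Decidable (Pre_check_reward arr) := by unfold Pre_check_reward; infer_instance
def pvWitness_check_reward : List Int := [3, 5, 3]

def Spec_check_reward (arr : List Int) (out : Int) : Prop := out = check_reward_alt arr
instance (arr : List Int) (out : Int) : Decidable (Spec_check_reward arr out) := by unfold Spec_check_reward; infer_instance

-- ===== CLAIM (what is proved, stated in full; the proofs are below) =====
def Claim_equal_check_reward : Prop := ∀ (arr : List Int), Dom_check_reward arr → Pre_check_reward arr → Spec_check_reward arr (check_reward arr)

-- ===== LEMMAS AND PROOFS =====
def pvCnt (arr : List Int) (j : Int) : Nat := arr.count j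
def pvL : List Int := [0, 1, 2, 3, 4, 5, 6]
def pvCl (arr : List Int) : List Int := pvL.map (fun j => (pvCnt arr j : Int))
def pvR (arr : List Int) : List (Int × Int) :=
  (pvL.filter (fun j => decide (0 < pvCnt arr j))).map (fun j => (j, (pvCnt arr j : Int)))
def pvChunks (arr : List Int) : List Int :=
  pvL.flatMap (fun j => List.replicate (pvCnt arr j) j)

-- A-side: count_number computes the 7 counts
theorem pv_cnt_cons (v : Int) (tl : List Int) (j : Int) :
    pvCnt (v :: tl) j = pvCnt tl j + (if v = j then 1 else 0) := by
  by_cases h : v = j <;> simp [pvCnt, h]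

theorem pv_countA (arr : List Int) : ∀ (a0 a1 a2 a3 a4 a5 a6 : Int),
    (∀ v ∈ arr, 0 ≤ v ∧ v ≤ 6) →
    arr.foldl (fun l i => PySem.List.pySetD l i (PySem.List.pyGetD l i 0 + 1)) [a0,a1,a2,a3,a4,a5,a6] =
    [a0 + (pvCnt arr 0 : Int), a1 + (pvCnt arr 1 : Int), a2 + (pvCnt arr 2 : Int), a3 + (pvCnt arr 3 : Int),
     a4 + (pvCnt arr 4 : Int), a5 + (pvCnt arr 5 : Int), a6 + (pvCnt arr 6 : Int)] := by
  induction arr with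
  | nil => intro _ _ _ _ _ _ _ _; simp [pvCnt]
  | cons v tl ih =>
    intro a0 a1 a2 a3 a4 a5 a6 hb
    obtain ⟨hv1, hv2⟩ := hb v (List.mem_cons_self ..)
    have hb' : ∀ w ∈ tl, 0 ≤ w ∧ w ≤ 6 := fun w hw => hb w (List.mem_cons_of_mem _ hw)
    have hst : PySem.List.pySetD [a0,a1,a2,a3,a4,a5,a6] v (PySem.List.pyGetD [a0,a1,a2,a3,a4,a5,a6] v 0 + 1)
        = [a0 + (if v = 0 then (1:Int) else 0), a1 + (if v = 1 then (1:Int) else 0),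
           a2 + (if v = 2 then (1:Int) else 0), a3 + (if v = 3 then (1:Int) else 0),
           a4 + (if v = 4 then (1:Int) else 0), a5 + (if v = 5 then (1:Int) else 0),
           a6 + (if v = 6 then (1:Int) else 0)] := by
      interval_cases v <;>
        norm_num [PySem.List.pySetD, PySem.List.pySet?, PySem.List.pyIdx?,
          PySem.List.pyGetD, PySem.List.pyGet?, show Int.toNat 6 = 6 from rfl, show Int.toNat 5 = 5 from rfl, show Int.toNat 4 = 4 from rfl, show Int.toNat 3 = 3 from rfl, show Int.toNat 2 = 2 from rfl, show Int.toNat 1 = 1 from rfl, show Int.toNat 0 = 0 from rfl, List.set]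
    rw [List.foldl_cons, hst, ih _ _ _ _ _ _ _ hb']
    simp only [pv_cnt_cons, List.cons.injEq, and_true]
    push_cast
    refine ⟨?_, ?_, ?_, ?_, ?_, ?_, ?_⟩ <;> split_ifs <;> ring

theorem pv_count_number_eq (arr : List Int) (hb : ∀ v ∈ arr, 0 ≤ v ∧ v ≤ 6) :
    count_number arr = pvCl arr := by
  unfold count_number
  have h := pv_countA arr 0 0 0 0 0 0 0 hb
  simp only [zero_add] at h
  rw [h]; rfl

-- B-side: sorted arr is the concatenation of the 7 face runs
theorem pv_sorted_eq (arr : List Int) (hb : ∀ v ∈ arr, 0 ≤ v ∧ v ≤ 6) :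
    PySem.List.sorted arr (fun x => x) false = pvChunks arr := by
  apply PySem.List.sorted_id_eq_of_perm_of_pairwise
  · rw [List.perm_iff_count]
    intro a
    by_cases h0 : a = 0
    · subst h0; simp [pvChunks, pvL, List.count_replicate, pvCnt]
    by_cases h1 : a = 1
    · subst h1; simp [pvChunks, pvL, List.count_replicate, pvCnt]
    by_cases h2 : a = 2
    · subst h2; simp [pvChunks, pvL, List.count_replicate, pvCnt]
    by_cases h3 : a = 3
    · subst h3; simp [pvChunks, pvL, List.count_replicate, pvCnt]
    by_cases h4 : a = 4
    · subst h4; simp [pvChunks, pvL, List.count_replicate, pvCnt]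
    by_cases h5 : a = 5
    · subst h5; simp [pvChunks, pvL, List.count_replicate, pvCnt]
    by_cases h6 : a = 6
    · subst h6; simp [pvChunks, pvL, List.count_replicate, pvCnt]
    · have hz : a ∉ arr := fun hm => by
        obtain ⟨l, u⟩ := hb a hm; interval_cases a <;> simp_all
      rw [List.count_eq_zero.mpr hz]
      simp only [pvChunks, pvL, List.flatMap_cons, List.flatMap_nil, List.append_nil,
        List.count_append, List.count_replicate]
      simp only [beq_iff_eq]
      split_ifs <;> omega
  · simp only [pvChunks, pvL, List.flatMap_cons, List.flatMap_nil, List.append_nil]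
    simp only [List.pairwise_append, List.pairwise_replicate, List.mem_replicate,
      List.mem_append]
    constructor
    · omega
    repeat' refine ⟨?_, ?_⟩ <;> try omega

-- grouping a run of equal faces extends the last pair
theorem pv_foldl_rep_last (n : Nat) : ∀ (acc : List (Int × Int)) (j : Int) (c : Int),
    List.foldl pvStep (acc ++ [(j, c)]) (List.replicate n j) = acc ++ [(j, c + n)] := by
  induction n with
  | zero => intro acc j c; simp
  | succ m ih =>
    intro acc j c
    rw [List.replicate_succ, List.foldl_cons]
    have hst : pvStep (acc ++ [(j, c)]) j = acc ++ [(j, c + 1)] := by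
      simp [pvStep]
    rw [hst, ih]
    congr 2
    push_cast; ring

theorem pv_foldl_rep (j : Int) (n : Nat) (acc : List (Int × Int))
    (hlt : ∀ p ∈ acc, p.1 < j) (hn : 0 < n) :
    List.foldl pvStep acc (List.replicate n j) = acc ++ [(j, (n : Int))] := by
  obtain ⟨m, rfl⟩ : ∃ m, n = m + 1 := ⟨n - 1, by omega⟩
  rw [List.replicate_succ, List.foldl_cons]
  have hst : pvStep acc j = acc ++ [(j, 1)] := by
    match hacc : acc.getLast? with
    | none =>
      have : acc = [] := List.getLast?_eq_none_iff.mp hacc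
      subst this; simp [pvStep]
    | some p =>
      have hp : p ∈ acc := List.mem_of_getLast? hacc
      have : p.1 ≠ j := ne_of_lt (hlt p hp)
      simp [pvStep, hacc, this]
  rw [hst, pv_foldl_rep_last]
  congr 2
  push_cast; ring

theorem pv_foldl_chunks (arr : List Int) : ∀ (js : List Int) (acc : List (Int × Int)),
    js.Pairwise (· < ·) → (∀ p ∈ acc, ∀ j ∈ js, p.1 < j) →
    List.foldl pvStep acc (js.flatMap (fun j => List.replicate (pvCnt arr j) j)) =
      acc ++ (js.filter (fun j => decide (0 < pvCnt arr j))).map (fun j => (j, (pvCnt arr j : Int))) := by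
  intro js
  induction js with
  | nil => intro acc _ _; simp
  | cons j t ih =>
    intro acc hpw hacc
    rw [List.flatMap_cons, List.foldl_append]
    have hpw' := List.Pairwise.of_cons hpw
    have hjt : ∀ j' ∈ t, j < j' := (List.pairwise_cons.mp hpw).1
    by_cases hz : 0 < pvCnt arr j
    · rw [pv_foldl_rep j _ acc (fun p hp => hacc p hp j (List.mem_cons_self ..)) hz]
      rw [ih (acc ++ [(j, (pvCnt arr j : Int))]) hpw' ?_]
      · rw [List.filter_cons_of_pos (by simpa using hz)]
        simp
      · intro p hp j' hj'
        rcases List.mem_append.mp hp with h | h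
        · exact hacc p h j' (List.mem_cons_of_mem _ hj')
        · simp only [List.mem_singleton] at h
          subst h
          exact hjt j' hj'
    · have : pvCnt arr j = 0 := by omega
      rw [this]
      simp only [List.replicate_zero, List.foldl_nil]
      rw [ih acc hpw' (fun p hp j' hj' => hacc p hp j' (List.mem_cons_of_mem _ hj'))]
      rw [List.filter_cons_of_neg (by simpa using hz)]

theorem pv_runs_eq (arr : List Int) (hb : ∀ v ∈ arr, 0 ≤ v ∧ v ≤ 6) :
    (PySem.List.sorted arr (fun x => x) false).foldl pvStep [] = pvR arr := by
  rw [pv_sorted_eq arr hb, pvChunks,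
    pv_foldl_chunks arr pvL [] (by decide) (by simp)]
  rfl

-- membership facts
theorem pv_mem_pvL (j : Int) (h0 : 0 ≤ j) (h7 : j < 7) : j ∈ pvL := by
  simp [pvL]; omega

theorem pv_mem_pvCl (arr : List Int) (x : Int) :
    x ∈ pvCl arr ↔ ∃ j : Int, 0 ≤ j ∧ j < 7 ∧ x = (pvCnt arr j : Int) := by
  constructor
  · intro hx
    obtain ⟨j, hj, rfl⟩ := List.mem_map.mp hx
    have : (0:Int) ≤ j ∧ j < 7 := by
      simp only [pvL, List.mem_cons, List.not_mem_nil, or_false] at hj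
      rcases hj with rfl|rfl|rfl|rfl|rfl|rfl|rfl <;> norm_num
    exact ⟨j, this.1, this.2, rfl⟩
  · rintro ⟨j, h0, h7, rfl⟩
    exact List.mem_map_of_mem (pv_mem_pvL j h0 h7)

-- max over the present-face counts = max over the 7-slot count list
theorem pv_max_eq (arr : List Int) (hb : ∀ v ∈ arr, 0 ≤ v ∧ v ≤ 6) :
    (PySem.List.max? ((pvR arr).map (fun p => p.2)) (fun x => x)).getD 0
    = (PySem.List.max? (pvCl arr) (fun x => x)).getD 0 := by
  rcases harr : arr with _ | ⟨w, tl⟩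
  · simp [pvR, pvCl, pvL, pvCnt]; decide
  · rw [← harr]
    have hwmem : w ∈ arr := by rw [harr]; exact List.mem_cons_self ..
    obtain ⟨hw0, hw6⟩ := hb w hwmem
    have hwc : 0 < pvCnt arr w := List.count_pos_iff.mpr hwmem
    have hwF : w ∈ pvL.filter (fun j => decide (0 < pvCnt arr j)) :=
      List.mem_filter.mpr ⟨pv_mem_pvL w hw0 (by omega), by simpa using hwc⟩
    -- A side max exists
    have hclne : pvCl arr ≠ [] := by simp [pvCl, pvL]
    obtain ⟨mA, hmA⟩ : ∃ m, PySem.List.max? (pvCl arr) (fun x => x) = some m := by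
      cases h : PySem.List.max? (pvCl arr) (fun x => x) with
      | none => exact absurd ((PySem.List.max?_eq_none_iff _ _).mp h) hclne
      | some m => exact ⟨m, rfl⟩
    have hmA_mem : mA ∈ pvCl arr := PySem.List.max?_mem hmA
    have hmA_max : ∀ y ∈ pvCl arr, y ≤ mA := fun y hy => PySem.List.max?_isMax hmA y hy
    -- B side max exists
    have hSne : (pvR arr).map (fun p => p.2) ≠ [] := by
      simp only [pvR, List.map_map, ne_eq, List.map_eq_nil_iff]
      intro h
      rw [h] at hwF
      simp at hwF
    obtain ⟨mB, hmB⟩ : ∃ m, PySem.List.max? ((pvR arr).map (fun p => p.2)) (fun x => x) = some m := by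
      cases h : PySem.List.max? ((pvR arr).map (fun p => p.2)) (fun x => x) with
      | none => exact absurd ((PySem.List.max?_eq_none_iff _ _).mp h) hSne
      | some m => exact ⟨m, rfl⟩
    have hmB_mem := PySem.List.max?_mem hmB
    have hmB_max : ∀ y ∈ (pvR arr).map (fun p => p.2), y ≤ mB :=
      fun y hy => PySem.List.max?_isMax hmB y hy
    rw [hmA, hmB]
    simp only [Option.getD_some]
    apply le_antisymm
    · -- mB ≤ mA
      simp only [pvR, List.map_map, List.mem_map, Function.comp_def] at hmB_mem
      obtain ⟨k, hk_mem, hk_eq⟩ := hmB_mem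
      obtain ⟨hkL, _⟩ := List.mem_filter.mp hk_mem
      exact hk_eq ▸ hmA_max _ (List.mem_map_of_mem hkL)
    · -- mA ≤ mB
      obtain ⟨jA, hj0, hj7, rfl⟩ := (pv_mem_pvCl arr mA).mp hmA_mem
      by_cases hz : pvCnt arr jA = 0
      · rw [hz]
        have : ((pvCnt arr w : Int)) ∈ (pvR arr).map (fun p => p.2) := by
          simp only [pvR, List.map_map, Function.comp_def]
          exact List.mem_map_of_mem hwF
        have h1 := hmB_max _ this
        push_cast
        omega
      · apply hmB_max
        simp only [pvR, List.map_map, Function.comp_def]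
        apply List.mem_map_of_mem
        exact List.mem_filter.mpr ⟨pv_mem_pvL jA hj0 hj7, by simp; omega⟩

-- find? through filter
theorem pv_find?_filter {α : Type} (p q : α → Bool) : ∀ (l : List α),
    (l.filter q).find? p = l.find? (fun x => q x && p x) := by
  intro l
  induction l with
  | nil => rfl
  | cons x t ih =>
    by_cases hq : q x
    · rw [List.filter_cons_of_pos hq]
      by_cases hp : p x
      · rw [List.find?_cons_of_pos hp, List.find?_cons_of_pos (by simp [hq, hp])]
      · rw [List.find?_cons_of_neg (by simpa using hp),
          List.find?_cons_of_neg (by simp [hp]), ih]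
    · rw [List.filter_cons_of_neg (by simpa using hq),
        List.find?_cons_of_neg (by simp [hq]), ih]

theorem pv_find?_congr {α : Type} (p q : α → Bool) : ∀ (l : List α),
    (∀ x ∈ l, p x = q x) → l.find? p = l.find? q := by
  intro l
  induction l with
  | nil => intro _; rfl
  | cons x t ih =>
    intro h
    have hx := h x (List.mem_cons_self ..)
    by_cases hp : p x
    · rw [List.find?_cons_of_pos hp, List.find?_cons_of_pos (hx ▸ hp)]
    · rw [List.find?_cons_of_neg (by simpa using hp),
        List.find?_cons_of_neg (by simp [← hx, hp]),
        ih (fun y hy => h y (List.mem_cons_of_mem _ hy))]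

-- B's find? over the runs, reduced to a face scan
theorem pv_findR (arr : List Int) (t : Int) (ht : 1 ≤ t) :
    (pvR arr).find? (fun p => p.2 == t)
    = (pvL.find? (fun j => (pvCnt arr j : Int) == t)).map (fun j => (j, (pvCnt arr j : Int))) := by
  rw [pvR, List.find?_map, pv_find?_filter]
  congr 1
  apply pv_find?_congr
  intro j _
  simp only [Function.comp_def]
  by_cases h : (pvCnt arr j : Int) = t
  · simp [h]; omega
  · simp [h]

-- A's index? over the count list, reduced to the same face scan
theorem pv_findIdx_pvL (q : Int → Bool) :
    pvL.findIdx? q = (pvL.find? q).map Int.toNat := by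
  cases h0 : q 0 <;> cases h1 : q 1 <;> cases h2 : q 2 <;> cases h3 : q 3 <;>
    cases h4 : q 4 <;> cases h5 : q 5 <;> cases h6 : q 6 <;>
    simp [pvL, List.findIdx?_cons, h0, h1, h2, h3, h4, h5, h6]

theorem pv_indexA (arr : List Int) (t : Int) :
    PySem.List.index? (pvCl arr) t
    = (pvL.find? (fun j => (pvCnt arr j : Int) == t)).map Int.toNat := by
  rw [PySem.List.index?_eq_idxOf?, pvCl, List.idxOf?, List.findIdx?_map, pv_findIdx_pvL]
  rfl

-- the two payout-line scans pick the same face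
theorem pv_first_eq (arr : List Int) (t : Int) (ht : 1 ≤ t)
    (hex : ∃ j : Int, 0 ≤ j ∧ j < 7 ∧ (pvCnt arr j : Int) = t) :
    ∃ j : Int, 0 ≤ j ∧ j < 7 ∧
      PySem.List.index? (pvCl arr) t = some j.toNat ∧
      (pvR arr).find? (fun p => p.2 == t) = some (j, t) := by
  obtain ⟨j0, hj0, hj7, hjt⟩ := hex
  have hmem : j0 ∈ pvL := pv_mem_pvL j0 hj0 hj7
  have hsome : (pvL.find? (fun j => (pvCnt arr j : Int) == t)).isSome := by
    rw [List.find?_isSome]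
    exact ⟨j0, hmem, by simpa using hjt⟩
  obtain ⟨j, hj⟩ := Option.isSome_iff_exists.mp hsome
  have hjL : j ∈ pvL := List.mem_of_find?_eq_some hj
  have hjcnt : (pvCnt arr j : Int) = t := by simpa using List.find?_some hj
  have hj0' : 0 ≤ j ∧ j < 7 := by
    simp only [pvL, List.mem_cons, List.not_mem_nil, or_false] at hjL
    rcases hjL with rfl|rfl|rfl|rfl|rfl|rfl|rfl <;> norm_num
  refine ⟨j, hj0'.1, hj0'.2, ?_, ?_⟩
  · rw [pv_indexA, hj]; rfl
  · rw [pv_findR arr t ht, hj]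
    simp [hjcnt]

-- the reverse single-face scans pick the same face
theorem pv_last_eq (arr : List Int) :
    ((pvR arr).reverse.find? (fun p => p.2 == (1 : Int) && decide (0 < p.1))).map Prod.fst
    = ([(6:Int), 5, 4, 3, 2, 1].find? (fun i => (pvCnt arr i : Int) == 1)) := by
  have h1 : (pvR arr).reverse
      = (pvL.reverse.filter (fun j => decide (0 < pvCnt arr j))).map (fun j => (j, (pvCnt arr j : Int))) := by
    rw [pvR, ← List.map_reverse, List.filter_reverse]
  rw [h1, List.find?_map, pv_find?_filter]
  have h2 : pvL.reverse.find?
        (fun j => decide (0 < pvCnt arr j) && ((fun p : Int × Int => p.2 == (1:Int) && decide (0 < p.1)) ∘ (fun j => (j, (pvCnt arr j : Int)))) j)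
      = pvL.reverse.find? (fun j => ((pvCnt arr j : Int) == 1) && decide (0 < j)) := by
    apply pv_find?_congr
    intro j _
    simp only [Function.comp_def]
    by_cases h : (pvCnt arr j : Int) = 1
    · simp [h]; omega
    · simp [h]
  rw [h2]
  have h3 : pvL.reverse = [(6:Int), 5, 4, 3, 2, 1, 0] := by decide
  rw [h3]
  cases hc6 : ((pvCnt arr 6 : Int) == 1) <;> cases hc5 : ((pvCnt arr 5 : Int) == 1) <;>
    cases hc4 : ((pvCnt arr 4 : Int) == 1) <;> cases hc3 : ((pvCnt arr 3 : Int) == 1) <;>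
    cases hc2 : ((pvCnt arr 2 : Int) == 1) <;> cases hc1 : ((pvCnt arr 1 : Int) == 1) <;>
    simp [hc6, hc5, hc4, hc3, hc2, hc1]

-- pyGetD on the 7-slot list at the scan faces
theorem pv_getD_pvCl (arr : List Int) (k : Nat) (hk : k < 7) :
    PySem.List.pyGetD (pvCl arr) (k : Int) 0 = (pvCnt arr (k : Int) : Int) := by
  interval_cases k <;>
    simp [pvCl, pvL, PySem.List.pyGetD, PySem.List.pyGet?, PySem.List.pyIdx?]

theorem pv_getD_pvCl' (arr : List Int) (k : Int) (h1 : 0 ≤ k) (h2 : k < 7) :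
    PySem.List.pyGetD (pvCl arr) k 0 = (pvCnt arr k : Int) := by
  have h := pv_getD_pvCl arr k.toNat (by omega)
  rwa [show ((k.toNat : Nat) : Int) = k by omega] at h

-- table lookups at an in-range face
theorem pv_tableT (j : Int) (h1 : 0 ≤ j) (h2 : j < 7) :
    (pvTRIPLE.get? j).getD 0 = j * 1000 + 10000 := by
  interval_cases j <;> decide

theorem pv_tableP (j : Int) (h1 : 0 ≤ j) (h2 : j < 7) :
    (pvPAIR.get? j).getD 0 = j * 100 + 1000 := by
  interval_cases j <;> decide

theorem pv_tableS (j : Int) (h1 : 0 ≤ j) (h2 : j < 7) :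
    (pvSINGLE.get? j).getD 0 = j * 100 := by
  interval_cases j <;> decide

-- the A-side max is witnessed by some face
theorem pv_MA_facts (arr : List Int) : ∃ j : Int, 0 ≤ j ∧ j < 7 ∧
    (PySem.List.max? (pvCl arr) (fun x => x)).getD 0 = (pvCnt arr j : Int) := by
  obtain ⟨m, hm⟩ : ∃ m, PySem.List.max? (pvCl arr) (fun x => x) = some m := by
    cases h : PySem.List.max? (pvCl arr) (fun x => x) with
    | none =>
      have := (PySem.List.max?_eq_none_iff (pvCl arr) (fun x => x)).mp h
      simp [pvCl, pvL] at this
    | some m => exact ⟨m, rfl⟩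
  obtain ⟨j, hj0, hj7, hje⟩ := (pv_mem_pvCl arr m).mp (PySem.List.max?_mem hm)
  exact ⟨j, hj0, hj7, by rw [hm, Option.getD_some, hje]⟩

-- ===== VERDICT (by name: the statement is the Claim_ definition above) =====
theorem check_reward_spec : Claim_equal_check_reward := by
  intro arr _ hpre
  obtain ⟨hb, _⟩ := hpre
  unfold Spec_check_reward
  have hcl : count_number arr = pvCl arr := pv_count_number_eq arr hb
  have hruns := pv_runs_eq arr hb
  simp only [check_reward, check_reward_alt, hcl, hruns, pv_max_eq arr hb]
  set MA := (PySem.List.max? (pvCl arr) (fun x => x)).getD 0 with hMAdef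
  obtain ⟨jM, hjM0, hjM7, hjMe⟩ := pv_MA_facts arr
  simp only [beq_iff_eq]
  by_cases h3 : MA = 3
  · rw [if_pos h3, if_pos h3]
    obtain ⟨j, hj0, hj7, hidx, hfind⟩ :=
      pv_first_eq arr 3 (by norm_num) ⟨jM, hjM0, hjM7, by rw [← hjMe, ← hMAdef, h3]⟩
    rw [h3, hidx, hfind]
    simp only [Option.getD_some]
    rw [pv_tableT j hj0 hj7]
    omega
  · rw [if_neg h3, if_neg h3]
    by_cases h2 : MA = 2
    · rw [if_pos h2, if_pos h2]
      obtain ⟨j, hj0, hj7, hidx, hfind⟩ :=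
        pv_first_eq arr 2 (by norm_num) ⟨jM, hjM0, hjM7, by rw [← hjMe, ← hMAdef, h2]⟩
      rw [h2, hidx, hfind]
      simp only [Option.getD_some]
      rw [pv_tableP j hj0 hj7]
      omega
    · rw [if_neg h2, if_neg h2]
      have hrange : PySem.List.pyRange 6 0 (-1) = [6, 5, 4, 3, 2, 1] := by decide
      rw [hrange]
      have hAscan : ([(6:Int), 5, 4, 3, 2, 1].find? (fun i => PySem.List.pyGetD (pvCl arr) i 0 == 1))
          = ([(6:Int), 5, 4, 3, 2, 1].find? (fun i => (pvCnt arr i : Int) == 1)) := by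
        apply pv_find?_congr
        intro i hi
        have hir : 0 ≤ i ∧ i < 7 := by
          simp only [List.mem_cons, List.not_mem_nil, or_false] at hi
          rcases hi with rfl|rfl|rfl|rfl|rfl|rfl <;> norm_num
        rw [pv_getD_pvCl' arr i hir.1 hir.2]
      have hle := pv_last_eq arr
      cases hfind : (pvR arr).reverse.find? (fun p => p.2 == (1 : Int) && decide (0 < p.1)) with
      | none =>
        rw [hfind] at hle
        rw [hAscan, ← hle]
        simp
      | some p =>
        rw [hfind] at hle
        rw [hAscan, ← hle]
        simp only [Option.map_some]
        have hp : p.1 ∈ [(6:Int), 5, 4, 3, 2, 1] :=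
          List.mem_of_find?_eq_some (by rw [← hle]; rfl)
        have hpr : 0 ≤ p.1 ∧ p.1 < 7 := by
          simp only [List.mem_cons, List.not_mem_nil, or_false] at hp
          rcases hp with h|h|h|h|h|h <;> rw [h] <;> norm_num
        rw [pv_tableS p.1 hpr.1 hpr.2]
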